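-- pv_equiv track=rewrite | github.com/ALSchwalm/foresight | foresight/glibc/rand_r.py | verify_candidate
-- ===== SOURCE A (Python) =====
-- MULTIPLIER = 1103515245
--
-- INCREMENT = 12345
--
-- MODULUS = 2**32
--
-- def find_components(value):
--     """ Extract the three values which have been combined to
--     form the given output.
--     """
--     r1 = value >> 20                  # 11 most significant bits
--     r2 = (2**10 - 1) & (value >> 10)  # 10 middle bits
--     r3 = (2**10 - 1) & value          # 10 least significant bits
--     return r1, r2, r3
--
-- def verify_candidate(candidate, values, output_modulus):
--     """ For a given possible state (candidate), determine whether
--     it is a possible true state, given a list of outputs and modulus.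
--
--     Returns None if candidate is non-viable; otherwise, returns the
--     state after outputting the given values (i.e., the current state).
--     """
--     next = candidate
--     for value in values:
--         r1, r2, r3 = find_components(value)
--         next *= MULTIPLIER
--         next += INCREMENT
--         next %= MODULUS
--         r1 = (next // 2**16) % 2**11
--
--         next *= MULTIPLIER
--         next += INCREMENT
--         next %= MODULUS
--         r2 = (next // 2**16) % 2**10
--
--         next *= MULTIPLIER
--         next += INCREMENT
--         next %= MODULUS
--         r3 = (next // 2**16) % 2**10
--
--         output = r1 << 20
--         output |= (r2 << 10)
--         output |= r3
--         if not output_modulus: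
--             if output != value:
--                 return None
--         else:
--             if output % output_modulus != value:
--                 return None
--     return next
-- ===== SOURCE B (Python) =====
-- MULTIPLIER = 1103515245
-- INCREMENT = 12345
-- MODULUS = 2**32
--
-- def _states(s, n):
--     """The next n raw LCG states after s, oldest first."""
--     out = []
--     for _ in range(n):
--         s = (s * MULTIPLIER + INCREMENT) % MODULUS
--         out.append(s)
--     return out
--
-- def _outputs(states):
--     """Fold consecutive state triples into rand_r output words (11+10+10 bits)."""
--     out = []
--     it = iter(states)
--     for a in it:
--         b = next(it)
--         c = next(it)
--         out.append(((a >> 16) % 2**11) * 2**20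
--                    + ((b >> 16) % 2**10) * 2**10
--                    + (c >> 16) % 2**10)
--     return out
--
-- def verify_candidate(candidate, values, output_modulus):
--     """Generate-then-compare re-implementation: first materialise the whole
--     LCG state stream, then assemble the expected output words per state
--     triple, then compare the expected list wholesale against the observed
--     values; the final state is the last generated state."""
--     states = _states(candidate, 3 * len(values))
--     outputs = _outputs(states)
--     if output_modulus:
--         outputs = [o % output_modulus for o in outputs]
--     if outputs != values:
--         return None
--     return states[-1] if states else candidate
-- ===== Notes on version B (the rewrite author's own statement) =====
-- stated objective: alternative
-- what changed: A checks as it goes (three unrolled LCG advance blocks per value, bit assembly by shift/or, early return on first mismatch); B is a staged generate-then-compare pipeline: it first materialises the whole LCG state stream, then folds consecutive state triples into the expected output list (arithmetic sum of disjoint bit fields), optionally reduces it by the modulus, and compares it wholesale against the observed values, returning the last generated state on success.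
import Mathlib
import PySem

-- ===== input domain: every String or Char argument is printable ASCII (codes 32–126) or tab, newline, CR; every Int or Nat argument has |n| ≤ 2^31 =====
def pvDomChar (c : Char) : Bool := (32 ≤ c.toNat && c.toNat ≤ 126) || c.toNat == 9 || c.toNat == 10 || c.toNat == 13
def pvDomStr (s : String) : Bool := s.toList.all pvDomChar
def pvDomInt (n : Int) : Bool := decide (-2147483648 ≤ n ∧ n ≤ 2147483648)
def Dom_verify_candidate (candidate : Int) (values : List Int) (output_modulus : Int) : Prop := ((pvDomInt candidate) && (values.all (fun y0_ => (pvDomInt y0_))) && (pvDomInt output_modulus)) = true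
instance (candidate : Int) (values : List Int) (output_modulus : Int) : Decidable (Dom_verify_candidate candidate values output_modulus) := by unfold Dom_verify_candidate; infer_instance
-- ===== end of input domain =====

-- B replaces A's interleaved check-as-you-go loop (three unrolled LCG blocks,
-- early return on mismatch) by a staged generate-then-compare pipeline:
-- materialise the whole state stream, assemble the expected output list,
-- compare it wholesale (objective: alternative; same asymptotic cost).

-- ===== PORT A =====
-- find_components (its result is overwritten by A before use, but it is called)
def findComponents (value : Int) : Int × Int × Int :=
  (value >>> (20 : Nat),
   PySem.Int.band (2 ^ 10 - 1) (value >>> (10 : Nat)),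
   PySem.Int.band (2 ^ 10 - 1) value)

def verifyGoA (next : Int) (values : List Int) (om : Int) : Option Int :=
  match values with
  | [] => some next
  | value :: rest =>
    let _rs := findComponents value
    let n1 := PySem.Int.mod (next * 1103515245 + 12345) (2 ^ 32)
    let r1 := PySem.Int.mod (PySem.Int.floordiv n1 (2 ^ 16)) (2 ^ 11)
    let n2 := PySem.Int.mod (n1 * 1103515245 + 12345) (2 ^ 32)
    let r2 := PySem.Int.mod (PySem.Int.floordiv n2 (2 ^ 16)) (2 ^ 10)
    let n3 := PySem.Int.mod (n2 * 1103515245 + 12345) (2 ^ 32)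
    let r3 := PySem.Int.mod (PySem.Int.floordiv n3 (2 ^ 16)) (2 ^ 10)
    let output := PySem.Int.bor (PySem.Int.bor (r1 <<< (20 : Nat)) (r2 <<< (10 : Nat))) r3
    if om = 0 then
      if output ≠ value then none else verifyGoA n3 rest om
    else
      if PySem.Int.mod output om ≠ value then none else verifyGoA n3 rest om

def verify_candidate (candidate : Int) (values : List Int) (output_modulus : Int) : Option Int :=
  verifyGoA candidate values output_modulus

-- ===== PORT B =====
-- Source B's _states: the next n raw LCG states after s, oldest first
def vcStates (s : Int) : Nat → List Int
  | 0 => []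
  | n + 1 =>
    let s' := PySem.Int.mod (s * 1103515245 + 12345) (2 ^ 32)
    s' :: vcStates s' n

-- Source B's _outputs: fold consecutive state triples into output words
def vcOutputs : List Int → List Int
  | a :: b :: c :: rest =>
    (PySem.Int.mod (a >>> (16 : Nat)) (2 ^ 11) * 2 ^ 20
     + PySem.Int.mod (b >>> (16 : Nat)) (2 ^ 10) * 2 ^ 10
     + PySem.Int.mod (c >>> (16 : Nat)) (2 ^ 10)) :: vcOutputs rest
  | _ => []

def verify_candidate_alt (candidate : Int) (values : List Int) (output_modulus : Int) : Option Int :=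
  let states := vcStates candidate (3 * values.length)
  let outputs := vcOutputs states
  let outputs := if output_modulus = 0 then outputs
                 else outputs.map (fun o => PySem.Int.mod o output_modulus)
  if outputs ≠ values then none
  else some (states.getLast?.getD candidate)

-- ===== PRECONDITION & SPEC =====
def Spec_verify_candidate (candidate : Int) (values : List Int) (output_modulus : Int) (out : Option Int) : Prop := out = verify_candidate_alt candidate values output_modulus
instance (candidate : Int) (values : List Int) (output_modulus : Int) (out : Option Int) : Decidable (Spec_verify_candidate candidate values output_modulus out) := by unfold Spec_verify_candidate; infer_instance

-- ===== CLAIM (what is proved, stated in full; the proofs are below) =====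
def Claim_equal_verify_candidate : Prop := ∀ (candidate : Int) (values : List Int) (output_modulus : Int), Dom_verify_candidate candidate values output_modulus → Spec_verify_candidate candidate values output_modulus (verify_candidate candidate values output_modulus)

-- ===== LEMMAS AND PROOFS =====

def vcStep (s : Int) : Int := PySem.Int.mod (s * 1103515245 + 12345) (2 ^ 32)

lemma vcStates_succ (s : Int) (n : Nat) :
    vcStates s (n + 1) = vcStep s :: vcStates (vcStep s) n := rfl

lemma vcStates_three (s : Int) (n : Nat) :
    vcStates s (3 * (n + 1))
      = vcStep s :: vcStep (vcStep s) :: vcStep (vcStep (vcStep s))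
          :: vcStates (vcStep (vcStep (vcStep s))) (3 * n) := by
  have h : 3 * (n + 1) = 3 * n + 1 + 1 + 1 := by ring
  rw [h, vcStates_succ, vcStates_succ, vcStates_succ]

lemma getLastD_cons (a d : Int) (l : List Int) :
    (a :: l).getLast?.getD d = l.getLast?.getD a := by
  cases l with
  | nil => rfl
  | cons b t =>
    rw [List.getLast?_cons_cons]
    cases h : (b :: t).getLast? with
    | none => simp at h
    | some x => rfl

-- or of disjoint bit fields is addition (Nat level)
lemma nat_lor_disj (k : Nat) : ∀ x y : Nat, y < 2 ^ k → (x * 2 ^ k) ||| y = x * 2 ^ k + y := by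
  induction k with
  | zero =>
    intro x y hy
    interval_cases y
    simp
  | succ k ih =>
    intro x y hy
    have hdecomp : Nat.bit (y.testBit 0) (y >>> 1) = y := Nat.bit_testBit_zero_shiftRight_one y
    have hx : x * 2 ^ (k + 1) = Nat.bit false (x * 2 ^ k) := by
      simp [Nat.bit_val, pow_succ]; ring
    have hy2 : y >>> 1 < 2 ^ k := by
      have h1 : y >>> 1 = y / 2 := Nat.shiftRight_one y
      have h2 : 2 ^ (k + 1) = 2 ^ k * 2 := pow_succ 2 k
      omega
    calc (x * 2 ^ (k + 1)) ||| y
        = Nat.bit false (x * 2 ^ k) ||| Nat.bit (y.testBit 0) (y >>> 1) := by rw [hx, hdecomp]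
      _ = Nat.bit (false || y.testBit 0) ((x * 2 ^ k) ||| (y >>> 1)) := Nat.lor_bit _ _ _ _
      _ = Nat.bit (y.testBit 0) (x * 2 ^ k + y >>> 1) := by rw [ih _ _ hy2]; simp
      _ = x * 2 ^ (k + 1) + y := by
          have h2 := Nat.bit_val (y.testBit 0) (y >>> 1)
          rw [hdecomp] at h2
          rw [Nat.bit_val]
          have hx2 : x * 2 ^ (k + 1) = 2 * (x * 2 ^ k) := by rw [pow_succ]; ring
          omega

-- or of disjoint bit fields is addition (Int level, the shape A's output uses)
lemma int_or_sum (a b c : Int) (ha : 0 ≤ a) (hb0 : 0 ≤ b) (hb : b < 2 ^ 10)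
    (hc0 : 0 ≤ c) (hc : c < 2 ^ 10) :
    PySem.Int.bor (PySem.Int.bor (a <<< (20 : Nat)) (b <<< (10 : Nat))) c
      = a * 2 ^ 20 + b * 2 ^ 10 + c := by
  rw [Int.shiftLeft_eq, Int.shiftLeft_eq]
  have hA : a * 2 ^ 20 = ((a.toNat * 2 ^ 20 : Nat) : Int) := by push_cast; rw [Int.toNat_of_nonneg ha]
  have hB : b * 2 ^ 10 = ((b.toNat * 2 ^ 10 : Nat) : Int) := by push_cast; rw [Int.toNat_of_nonneg hb0]
  have hC : c = ((c.toNat : Nat) : Int) := by rw [Int.toNat_of_nonneg hc0]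
  rw [hA, hB, hC, PySem.Int.bor_natCast, PySem.Int.bor_natCast]
  have hb' : b.toNat < 2 ^ 10 := by omega
  have hc' : c.toNat < 2 ^ 10 := by omega
  have h1 : (a.toNat * 2 ^ 20) ||| (b.toNat * 2 ^ 10) = a.toNat * 2 ^ 20 + b.toNat * 2 ^ 10 := by
    have hlt : b.toNat * 2 ^ 10 < 2 ^ 20 := by
      have h20 : (2 : Nat) ^ 20 = 2 ^ 10 * 2 ^ 10 := by norm_num
      have hm := Nat.mul_le_mul_right (2 ^ 10) (Nat.le_of_lt_succ (by omega : b.toNat < (2 ^ 10 - 1) + 1))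
      omega
    exact nat_lor_disj 20 a.toNat (b.toNat * 2 ^ 10) hlt
  have h2 : (a.toNat * 2 ^ 20 + b.toNat * 2 ^ 10) ||| c.toNat
      = a.toNat * 2 ^ 20 + b.toNat * 2 ^ 10 + c.toNat := by
    have hform : a.toNat * 2 ^ 20 + b.toNat * 2 ^ 10 = (a.toNat * 2 ^ 10 + b.toNat) * 2 ^ 10 := by ring
    rw [hform, nat_lor_disj 10 _ _ hc']
  rw [h1, h2]
  push_cast
  ring

-- shift-right = floor division by the power of two
lemma shr_eq_floordiv (n : Int) : n >>> (16 : Nat) = PySem.Int.floordiv n (2 ^ 16) := by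
  rw [PySem.Int.floordiv_eq_ediv_of_pos (by norm_num)]
  simp [Int.shiftRight_eq_div_pow]

-- A's output word equals B's arithmetic sum, for the same three states
lemma output_eq (a b c : Int) :
    PySem.Int.bor (PySem.Int.bor
        ((PySem.Int.mod (PySem.Int.floordiv a (2 ^ 16)) (2 ^ 11)) <<< (20 : Nat))
        ((PySem.Int.mod (PySem.Int.floordiv b (2 ^ 16)) (2 ^ 10)) <<< (10 : Nat)))
        (PySem.Int.mod (PySem.Int.floordiv c (2 ^ 16)) (2 ^ 10))
      = PySem.Int.mod (a >>> (16 : Nat)) (2 ^ 11) * 2 ^ 20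
        + PySem.Int.mod (b >>> (16 : Nat)) (2 ^ 10) * 2 ^ 10
        + PySem.Int.mod (c >>> (16 : Nat)) (2 ^ 10) := by
  rw [shr_eq_floordiv a, shr_eq_floordiv b, shr_eq_floordiv c]
  exact int_or_sum _ _ _
    (PySem.Int.mod_nonneg _ (by norm_num))
    (PySem.Int.mod_nonneg _ (by norm_num))
    (PySem.Int.mod_lt _ (by norm_num))
    (PySem.Int.mod_nonneg _ (by norm_num))
    (PySem.Int.mod_lt _ (by norm_num))

-- B's pipeline, as a function of the running state (used only in the proof)
def altCore (s : Int) (values : List Int) (om : Int) : Option Int :=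
  let states := vcStates s (3 * values.length)
  let outputs := vcOutputs states
  let outputs := if om = 0 then outputs else outputs.map (fun o => PySem.Int.mod o om)
  if outputs ≠ values then none else some (states.getLast?.getD s)

lemma altCore_eq_alt (c : Int) (values : List Int) (om : Int) :
    verify_candidate_alt c values om = altCore c values om := rfl

-- one cons step of A, with the chained states written via vcStep
lemma A_cons (s value om : Int) (rest : List Int) : verifyGoA s (value :: rest) om =
    if om = 0 then
      (if PySem.Int.bor (PySem.Int.bor
          ((PySem.Int.mod (PySem.Int.floordiv (vcStep s) (2 ^ 16)) (2 ^ 11)) <<< (20 : Nat))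
          ((PySem.Int.mod (PySem.Int.floordiv (vcStep (vcStep s)) (2 ^ 16)) (2 ^ 10)) <<< (10 : Nat)))
          (PySem.Int.mod (PySem.Int.floordiv (vcStep (vcStep (vcStep s))) (2 ^ 16)) (2 ^ 10)) ≠ value
       then none else verifyGoA (vcStep (vcStep (vcStep s))) rest om)
    else
      (if PySem.Int.mod (PySem.Int.bor (PySem.Int.bor
          ((PySem.Int.mod (PySem.Int.floordiv (vcStep s) (2 ^ 16)) (2 ^ 11)) <<< (20 : Nat))
          ((PySem.Int.mod (PySem.Int.floordiv (vcStep (vcStep s)) (2 ^ 16)) (2 ^ 10)) <<< (10 : Nat)))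
          (PySem.Int.mod (PySem.Int.floordiv (vcStep (vcStep (vcStep s))) (2 ^ 16)) (2 ^ 10))) om ≠ value
       then none else verifyGoA (vcStep (vcStep (vcStep s))) rest om) := rfl

-- one cons step of B's pipeline
lemma B_cons (s value om : Int) (rest : List Int) : altCore s (value :: rest) om =
    if om = 0 then
      (if (PySem.Int.mod (vcStep s >>> (16 : Nat)) (2 ^ 11) * 2 ^ 20
           + PySem.Int.mod (vcStep (vcStep s) >>> (16 : Nat)) (2 ^ 10) * 2 ^ 10
           + PySem.Int.mod (vcStep (vcStep (vcStep s)) >>> (16 : Nat)) (2 ^ 10)) ≠ value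
       then none else altCore (vcStep (vcStep (vcStep s))) rest om)
    else
      (if PySem.Int.mod (PySem.Int.mod (vcStep s >>> (16 : Nat)) (2 ^ 11) * 2 ^ 20
           + PySem.Int.mod (vcStep (vcStep s) >>> (16 : Nat)) (2 ^ 10) * 2 ^ 10
           + PySem.Int.mod (vcStep (vcStep (vcStep s)) >>> (16 : Nat)) (2 ^ 10)) om ≠ value
       then none else altCore (vcStep (vcStep (vcStep s))) rest om) := by
  unfold altCore
  rw [List.length_cons, vcStates_three]
  simp only [vcOutputs]
  rw [getLastD_cons, getLastD_cons, getLastD_cons]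
  by_cases hom : om = 0
  · simp only [if_pos hom, ne_eq, List.cons.injEq, not_and]
    split_ifs with h1 h2 h3 <;> first | rfl | (exfalso; tauto)
  · simp only [if_neg hom, List.map_cons, ne_eq, List.cons.injEq, not_and]
    split_ifs with h1 h2 h3 <;> first | rfl | (exfalso; tauto)

lemma go_eq (values : List Int) : ∀ (s om : Int),
    verifyGoA s values om = altCore s values om := by
  induction values with
  | nil => intro s om; simp [verifyGoA, altCore, vcStates, vcOutputs]
  | cons value rest ih =>
    intro s om
    rw [A_cons, output_eq, B_cons, ih]

-- ===== VERDICT (by name: the statement is the Claim_ definition above) =====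
theorem verify_candidate_spec : Claim_equal_verify_candidate := by
  intro candidate values output_modulus _
  unfold Spec_verify_candidate verify_candidate
  rw [altCore_eq_alt]
  exact go_eq values candidate output_modulus
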